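-- pv_equiv track=rewrite | github.com/meVisakan/Practicing_Python | InterviewQuestions/Completed/GlobalLogic/GlobalLogic.py | total_combinations
-- ===== SOURCE A (Python) =====
-- def is_prime(n):
--     """Returns True if n is a prime number, otherwise False."""
--     if n < 2:
--         return False
--     if n in (2, 3):
--         return True
--     if n % 2 == 0 or n % 3 == 0:
--         return False
--     i = 5
--     while i * i <= n:
--         if n % i == 0 or n % (i + 2) == 0:
--             return False
--         i += 6
--     return True
--
-- def get_valid_selections(n, is_odd_index):
--     """Returns the count of valid ways to pick balls from a bag."""
--     valid_count = 0
--     for i in range(2, n + 1):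
--         if (is_odd_index and is_prime(i)) or (not is_odd_index and not is_prime(i)):
--             valid_count += 1
--     return valid_count
--
-- def total_combinations(arr):
--     """Calculates total valid ball selection combinations."""
--     total_ways = 1
--     for i in range(len(arr)):
--         bag_size = arr[i]
--         is_odd_index = (i + 1) % 2 == 1  # 1-based index check
--         ways = get_valid_selections(bag_size, is_odd_index)
--         total_ways *= max(ways, 1)  # Ensure at least 1 way
--     return total_ways
-- ===== SOURCE B (Python) =====
-- def _is_prime(n):
--     """Trial division (6k±1) primality test."""
--     if n < 2:
--         return False
--     if n in (2, 3):
--         return True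
--     if n % 2 == 0 or n % 3 == 0:
--         return False
--     i = 5
--     while i * i <= n:
--         if n % i == 0 or n % (i + 2) == 0:
--             return False
--         i += 6
--     return True
--
-- def total_combinations(arr):
--     """Calculates total valid ball selection combinations."""
--     m = max(arr, default=1)
--     # pi[k] = number of primes <= k, built once for the whole array
--     pi = [0, 0]
--     cnt = 0
--     for k in range(2, m + 1):
--         if _is_prime(k):
--             cnt += 1
--         pi.append(cnt)
--     total = 1
--     for i, n in enumerate(arr):
--         if n < 2:
--             ways = 0
--         elif i % 2 == 0:  # 1-based odd index: count primes in [2, n]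
--             ways = pi[n]
--         else:             # even index: count non-primes in [2, n]
--             ways = (n - 1) - pi[n]
--         total *= max(ways, 1)
--     return total
-- ===== Notes on version B (the rewrite author's own statement) =====
-- stated objective: faster
-- what changed: Instead of scanning 2..n with a trial-division primality test separately for every bag, B builds one prefix prime-count table up to max(arr) and answers each bag (primes or non-primes in [2,n]) with an O(1) table lookup.
import Mathlib
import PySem

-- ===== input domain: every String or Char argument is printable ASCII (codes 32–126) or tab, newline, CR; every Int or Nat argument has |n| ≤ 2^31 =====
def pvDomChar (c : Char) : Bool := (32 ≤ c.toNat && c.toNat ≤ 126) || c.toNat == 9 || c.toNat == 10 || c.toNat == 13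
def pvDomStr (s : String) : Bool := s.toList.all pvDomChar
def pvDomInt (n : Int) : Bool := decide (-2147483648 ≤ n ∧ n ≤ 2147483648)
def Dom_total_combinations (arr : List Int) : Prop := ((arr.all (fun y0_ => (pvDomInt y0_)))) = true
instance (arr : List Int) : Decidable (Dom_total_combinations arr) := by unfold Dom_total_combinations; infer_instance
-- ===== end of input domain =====

-- B replaces A's per-bag primality scan by one shared prefix prime-count table (built once up to max(arr)),
-- answering each bag in O(1); objective: faster.

-- ===== PORT A =====
-- is_prime's while loop (i = 5, 11, 17, … while i*i <= n)
def isPrimeLoop (n i : Int) : Bool :=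
  if _h : i * i ≤ n then
    if PySem.Int.mod n i == 0 || PySem.Int.mod n (i + 2) == 0 then false
    else isPrimeLoop n (i + 6)
  else true
termination_by (n + 1 - i).toNat
decreasing_by
  have hi : i ≤ n := by nlinarith [sq_nonneg (i - 1), sq_nonneg i]
  omega

def pyIsPrime (n : Int) : Bool :=
  if n < 2 then false
  else if n == 2 || n == 3 then true
  else if PySem.Int.mod n 2 == 0 || PySem.Int.mod n 3 == 0 then false
  else isPrimeLoop n 5

def getValidSelections (n : Int) (isOddIndex : Bool) : Int :=
  (PySem.List.pyRange 2 (n + 1)).foldl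
    (fun validCount i =>
      if (isOddIndex && pyIsPrime i) || (!isOddIndex && !pyIsPrime i) then validCount + 1
      else validCount) 0

def total_combinations (arr : List Int) : Int :=
  (PySem.List.pyRange 0 (PySem.List.len arr)).foldl
    (fun totalWays i =>
      let bagSize := PySem.List.pyGetD arr i 0   -- arr[i]; i ranges over range(len(arr)), always in range
      let isOddIndex := PySem.Int.mod (i + 1) 2 == 1
      let ways := getValidSelections bagSize isOddIndex
      totalWays * max ways 1) 1

-- ===== PORT B =====
-- body of Source B's table-building loop
def piStep (st : List Int × Int) (k : Int) : List Int × Int :=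
  let cnt := if pyIsPrime k then st.2 + 1 else st.2
  (st.1 ++ [cnt], cnt)

def total_combinations_alt (arr : List Int) : Int :=
  let m := PySem.List.maxD arr (fun y => y) 1
  let pi := ((PySem.List.pyRange 2 (m + 1)).foldl piStep (([0, 0] : List Int), (0 : Int))).1
  (PySem.List.enumerate arr).foldl
    (fun (total : Int) p =>
      let ways : Int :=
        if p.2 < 2 then 0
        else if PySem.Int.mod p.1 2 == 0 then PySem.List.pyGetD pi p.2 0   -- pi[n]; 2 ≤ n ≤ m, always in range
        else (p.2 - 1) - PySem.List.pyGetD pi p.2 0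
      total * max ways 1) 1

-- ===== PRECONDITION & SPEC =====
def Spec_total_combinations (arr : List Int) (out : Int) : Prop := out = total_combinations_alt arr
instance (arr : List Int) (out : Int) : Decidable (Spec_total_combinations arr out) := by unfold Spec_total_combinations; infer_instance

-- ===== CLAIM (what is proved, stated in full; the proofs are below) =====
def Claim_equal_total_combinations : Prop := ∀ (arr : List Int), Dom_total_combinations arr → Spec_total_combinations arr (total_combinations arr)

-- ===== LEMMAS AND PROOFS =====

-- number of primes in [2, n], the value B's table stores at index n
def primeCount (n : Int) : Int := ((PySem.List.pyRange 2 (n + 1)).countP pyIsPrime : Int)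

theorem gvs_true (n : Int) : getValidSelections n true = primeCount n := by
  unfold getValidSelections
  simp only [Bool.true_and, Bool.not_true, Bool.false_and, Bool.or_false]
  rw [PySem.List.foldl_if_add_one pyIsPrime]
  simp [primeCount]

theorem gvs_false (n : Int) (h : 1 ≤ n) :
    getValidSelections n false = (n - 1) - primeCount n := by
  unfold getValidSelections
  simp only [Bool.false_and, Bool.false_or, Bool.not_false, Bool.true_and]
  rw [PySem.List.foldl_if_add_one (fun i => !pyIsPrime i)]
  have hl := List.length_eq_countP_add_countP pyIsPrime (l := PySem.List.pyRange 2 (n + 1))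
  have hc : (PySem.List.pyRange 2 (n + 1)).countP (fun a => decide ¬pyIsPrime a = true)
      = (PySem.List.pyRange 2 (n + 1)).countP (fun i => !pyIsPrime i) := by
    apply List.countP_congr; intro x _; simp
  have hlen := PySem.List.length_pyRange_one 2 (n + 1)
  rw [hc] at hl
  simp only [primeCount]
  omega

theorem primeCount_succ (k : Int) (h : 1 ≤ k) :
    primeCount (k + 1) = primeCount k + (if pyIsPrime (k + 1) then 1 else 0) := by
  unfold primeCount
  rw [show k + 1 + 1 = (k + 1) + 1 from rfl, PySem.List.pyRange_one_succ_right (by omega)]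
  rw [List.countP_append]
  simp only [List.countP_cons, List.countP_nil, Nat.zero_add]
  push_cast
  split <;> simp

theorem piBuild (t : Nat) :
    (PySem.List.pyRange 2 (2 + (t : Int))).foldl piStep (([0, 0] : List Int), (0 : Int))
      = (List.map (fun j : Nat => primeCount (j : Int)) (List.range (t + 2)), primeCount ((t : Int) + 1)) := by
  induction t with
  | zero => decide
  | succ t ih =>
    have hcast : (2 + ((t + 1 : Nat) : Int)) = (2 + (t : Int)) + 1 := by push_cast; ring
    rw [hcast, PySem.List.pyRange_one_succ_right (by omega), List.foldl_append, ih]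
    have hcnt : (if pyIsPrime (2 + (t : Int)) then primeCount ((t : Int) + 1) + 1
        else primeCount ((t : Int) + 1)) = primeCount (((t : Int) + 1) + 1) := by
      rw [primeCount_succ ((t : Int) + 1) (by omega),
        show (2 : Int) + (t : Int) = ((t : Int) + 1) + 1 by ring]
      split <;> ring
    simp only [List.foldl_cons, List.foldl_nil, piStep, hcnt]
    have h1 : ((t + 1 : Nat) : Int) + 1 = ((t : Int) + 1) + 1 := by push_cast; ring
    have h2 : List.map (fun j : Nat => primeCount (j : Int)) (List.range (t + 1 + 2))
        = List.map (fun j : Nat => primeCount (j : Int)) (List.range (t + 2))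
          ++ [primeCount (((t : Int) + 1) + 1)] := by
      rw [show t + 1 + 2 = (t + 2) + 1 from rfl, List.range_succ, List.map_append]
      simp only [List.map_cons, List.map_nil]
      congr 2
    rw [h1, h2]

theorem pi_lookup (m n : Int) (h2 : 2 ≤ n) (hnm : n ≤ m) :
    PySem.List.pyGetD ((PySem.List.pyRange 2 (m + 1)).foldl piStep (([0, 0] : List Int), (0 : Int))).1 n 0
      = primeCount n := by
  have ht : m + 1 = 2 + (((m - 1).toNat : Nat) : Int) := by omega
  rw [ht, piBuild]
  have hn : n = ((n.toNat : Nat) : Int) := by omega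
  rw [hn, PySem.List.pyGetD_natCast]
  rw [PySem.List.getD_map_range _ _ _ _ (by omega)]

theorem gvs_small (n : Int) (h : n < 2) (b : Bool) : getValidSelections n b = 0 := by
  unfold getValidSelections
  rw [PySem.List.pyRange_one_eq_nil (by omega)]
  rfl

theorem parity_eq (i : Int) :
    (PySem.Int.mod (i + 1) 2 == 1) = (PySem.Int.mod i 2 == 0) := by
  rw [PySem.Int.mod_eq_emod_of_pos (by norm_num), PySem.Int.mod_eq_emod_of_pos (by norm_num)]
  apply Bool.coe_iff_coe.mp
  simp only [beq_iff_eq]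
  omega

-- ===== VERDICT (by name: the statement is the Claim_ definition above) =====
theorem total_combinations_spec : Claim_equal_total_combinations := by
  intro arr _
  unfold Spec_total_combinations total_combinations total_combinations_alt
  rw [PySem.List.enumerate_eq_map_pyRange arr 0, List.foldl_map]
  refine PySem.List.foldl_congr_mem _ _ _ _ ?_
  intro acc i hi
  rw [PySem.List.mem_pyRange_one, PySem.List.len_eq] at hi
  dsimp only
  congr 1
  congr 1
  by_cases h2 : PySem.List.pyGetD arr i 0 < 2
  · rw [if_pos h2, gvs_small _ h2]
  · rw [if_neg h2]
    have hmem : PySem.List.pyGetD arr i 0 ∈ arr :=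
      PySem.List.pyGetD_mem arr 0 (by simp only [PySem.Raise.InRange]; omega)
    rcases hmq : PySem.List.max? arr (fun y => y) with _ | v
    · rw [PySem.List.max?_eq_none_iff] at hmq
      subst hmq
      simp at hmem
    · have hv : PySem.List.pyGetD arr i 0 ≤ v := PySem.List.max?_isMax hmq _ hmem
      have hmd : PySem.List.maxD arr (fun y => y) 1 = v := by
        simp [PySem.List.maxD, hmq]
      rw [hmd, parity_eq i]
      by_cases hp : PySem.Int.mod i 2 = 0
      · rw [show (PySem.Int.mod i 2 == 0) = true by rw [hp]; rfl, if_pos rfl, gvs_true,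
          pi_lookup v _ (by omega) hv]
      · rw [show (PySem.Int.mod i 2 == 0) = false by
          rcases PySem.Int.mod_two_eq i with h | h
          · exact absurd h hp
          · rw [h]; rfl]
        rw [if_neg (by simp), gvs_false _ (by omega), pi_lookup v _ (by omega) hv]
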